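-- pv_equiv track=rewrite | github.com/alibaba/euler | euler/tools/node.py | convert_neighbor
-- ===== SOURCE A (Python) =====
-- def convert_neighbor(neighbor_index):
--     groups_idx = []
--     neighbor = []
--     weight = []
--     type_ids = []
--     type_weights = []
--     idx = 0
--     sum_weight = 0
--     i = 0
--     for t_neighbors in neighbor_index:
--         idx += len(t_neighbors)
--         groups_idx.append(idx)
--         type_weight = 0
--         for n in t_neighbors:
--             neighbor.append(n[0])
--             sum_weight += n[1]
--             type_weight += n[1]
--             weight.append(sum_weight)
--
--         type_ids.append(i)
--         type_weights.append(type_weight)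
--         i += 1
--     return groups_idx, neighbor, weight, type_ids, type_weights
-- ===== SOURCE B (Python) =====
-- def _prefix_sums(xs):
--     out = []
--     s = 0
--     for x in xs:
--         s += x
--         out.append(s)
--     return out
--
--
-- def convert_neighbor(neighbor_index):
--     neighbor = [n[0] for t in neighbor_index for n in t]
--     weight = _prefix_sums([n[1] for t in neighbor_index for n in t])
--     groups_idx = _prefix_sums([len(t) for t in neighbor_index])
--     type_ids = list(range(len(neighbor_index)))
--     type_weights = [sum(n[1] for n in t) for t in neighbor_index]
--     return groups_idx, neighbor, weight, type_ids, type_weights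
-- ===== Notes on version B (the rewrite author's own statement) =====
-- stated objective: idiomatic
-- what changed: The single fused stateful loop (eight mutable accumulators) is split into independent passes: flat comprehensions for neighbor and weights, a prefix-sum helper for the two cumulative arrays, range() for type_ids and per-group sums for type_weights.
import Mathlib
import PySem

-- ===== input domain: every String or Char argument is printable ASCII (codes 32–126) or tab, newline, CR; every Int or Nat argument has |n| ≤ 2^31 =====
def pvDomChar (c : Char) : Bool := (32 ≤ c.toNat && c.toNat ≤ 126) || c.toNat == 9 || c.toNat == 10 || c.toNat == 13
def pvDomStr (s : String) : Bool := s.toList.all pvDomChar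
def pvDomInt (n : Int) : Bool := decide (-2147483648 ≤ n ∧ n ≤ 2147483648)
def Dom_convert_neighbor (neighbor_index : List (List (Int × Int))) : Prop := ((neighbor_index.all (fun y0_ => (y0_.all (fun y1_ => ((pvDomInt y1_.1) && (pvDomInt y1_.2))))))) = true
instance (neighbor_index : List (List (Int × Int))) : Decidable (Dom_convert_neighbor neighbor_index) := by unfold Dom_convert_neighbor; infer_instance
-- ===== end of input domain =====

-- B: replaces A's fused eight-accumulator loop with independent passes (flat maps, a prefix-sum helper, range); same cost, more idiomatic.
-- ===== PORT A =====
-- inner loop: for n in t_neighbors: neighbor.append(n[0]); sum_weight += n[1]; type_weight += n[1]; weight.append(sum_weight)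
def convInner (t : List (Int × Int)) (st : List Int × List Int × Int × Int) : List Int × List Int × Int × Int :=
  t.foldl (fun st n =>
    let (nb, w, sw, tw) := st
    (nb ++ [n.1], w ++ [sw + n.2], sw + n.2, tw + n.2)) st

def convert_neighbor (neighbor_index : List (List (Int × Int))) : List Int × List Int × List Int × List Int × List Int :=
  let st := neighbor_index.foldl (fun st t =>
    let (gi, nb, w, ti, tws, idx, sw, i) := st
    let idx' := idx + (t.length : Int)
    let (nb', w', sw', tw) := convInner t (nb, w, sw, 0)
    (gi ++ [idx'], nb', w', ti ++ [i], tws ++ [tw], idx', sw', i + 1))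
    (([] : List Int), ([] : List Int), ([] : List Int), ([] : List Int), ([] : List Int), (0 : Int), (0 : Int), (0 : Int))
  (st.1, st.2.1, st.2.2.1, st.2.2.2.1, st.2.2.2.2.1)

-- ===== PORT B =====
-- _prefix_sums: running-sum list, transliterated as structural recursion on the same state
def prefixSumsFrom (s : Int) : List Int → List Int
  | [] => []
  | x :: xs => (s + x) :: prefixSumsFrom (s + x) xs

def convert_neighbor_alt (neighbor_index : List (List (Int × Int))) : List Int × List Int × List Int × List Int × List Int :=
  let neighbor := neighbor_index.flatMap (fun t => t.map Prod.fst)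
  let weight := prefixSumsFrom 0 (neighbor_index.flatMap (fun t => t.map Prod.snd))
  let groups_idx := prefixSumsFrom 0 (neighbor_index.map (fun t => (t.length : Int)))
  let type_ids := PySem.List.pyRange 0 (neighbor_index.length : Int) 1
  let type_weights := neighbor_index.map (fun t => (t.map Prod.snd).sum)
  (groups_idx, neighbor, weight, type_ids, type_weights)

-- ===== PRECONDITION & SPEC =====
def Spec_convert_neighbor (neighbor_index : List (List (Int × Int))) (out : List Int × List Int × List Int × List Int × List Int) : Prop := out = convert_neighbor_alt neighbor_index
instance (neighbor_index : List (List (Int × Int))) (out : List Int × List Int × List Int × List Int × List Int) : Decidable (Spec_convert_neighbor neighbor_index out) := by unfold Spec_convert_neighbor; infer_instance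

-- ===== CLAIM (what is proved, stated in full; the proofs are below) =====
def Claim_equal_convert_neighbor : Prop := ∀ (neighbor_index : List (List (Int × Int))), Dom_convert_neighbor neighbor_index → Spec_convert_neighbor neighbor_index (convert_neighbor neighbor_index)

-- ===== LEMMAS AND PROOFS =====

-- ===== VERDICT (by name: the statement is the Claim_ definition above) =====
lemma prefixSumsFrom_append (s : Int) (xs ys : List Int) :
    prefixSumsFrom s (xs ++ ys) = prefixSumsFrom s xs ++ prefixSumsFrom (s + xs.sum) ys := by
  induction xs generalizing s with
  | nil => simp [prefixSumsFrom]
  | cons x xs ih => simp [prefixSumsFrom, ih, add_assoc]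

lemma convInner_eq (t : List (Int × Int)) (nb w : List Int) (sw tw : Int) :
    convInner t (nb, w, sw, tw)
      = (nb ++ t.map Prod.fst, w ++ prefixSumsFrom sw (t.map Prod.snd),
         sw + (t.map Prod.snd).sum, tw + (t.map Prod.snd).sum) := by
  induction t generalizing nb w sw tw with
  | nil => simp [convInner, prefixSumsFrom]
  | cons n t ih =>
    simp only [convInner, List.foldl_cons] at *
    rw [ih]
    simp [prefixSumsFrom, add_assoc]

lemma conv_loop_eq (l : List (List (Int × Int))) (gi nb w ti tws : List Int) (idx sw i : Int) :
    l.foldl (fun st t =>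
      let (gi, nb, w, ti, tws, idx, sw, i) := st
      let idx' := idx + (t.length : Int)
      let (nb', w', sw', tw) := convInner t (nb, w, sw, 0)
      (gi ++ [idx'], nb', w', ti ++ [i], tws ++ [tw], idx', sw', i + 1))
      (gi, nb, w, ti, tws, idx, sw, i)
    = (gi ++ prefixSumsFrom idx (l.map (fun t => (t.length : Int))),
       nb ++ l.flatMap (fun t => t.map Prod.fst),
       w ++ prefixSumsFrom sw (l.flatMap (fun t => t.map Prod.snd)),
       ti ++ PySem.List.pyRange i (i + (l.length : Int)) 1,
       tws ++ l.map (fun t => (t.map Prod.snd).sum),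
       idx + (l.map (fun t => (t.length : Int))).sum,
       sw + (l.flatMap (fun t => t.map Prod.snd)).sum,
       i + l.length) := by
  induction l generalizing gi nb w ti tws idx sw i with
  | nil => simp [prefixSumsFrom, PySem.List.pyRange_one_eq_nil]
  | cons t l ih =>
    simp only [List.foldl_cons]
    rw [convInner_eq, ih]
    have hlt : i < i + ((l.length : Int) + 1) := by omega
    simp only [List.length_cons, Nat.cast_add, Nat.cast_one]
    rw [PySem.List.pyRange_one_cons hlt]
    simp [prefixSumsFrom, prefixSumsFrom_append]
    exact ⟨by ring_nf, by ring, by ring, by ring⟩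

theorem convert_neighbor_spec : Claim_equal_convert_neighbor := by
  intro ni _
  unfold Spec_convert_neighbor convert_neighbor convert_neighbor_alt
  rw [conv_loop_eq]
  simp
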